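-- pv_equiv track=rewrite | github.com/Hisou-Tenshi/Calling | backend/main.py | _trim_conversation
-- ===== SOURCE A (Python) =====
-- from typing import Any
--
-- def _trim_conversation(messages: list[dict[str, Any]], max_user_turns: int = 20) -> list[dict[str, Any]]:
--     # Keep last N user messages and all assistant messages following them.
--     user_msgs = [m for m in messages if m.get("role") == "user"]
--     if len(user_msgs) <= max_user_turns:
--         return messages
--
--     # Find the index of the user message that will become the oldest in window.
--     target_user_count = max_user_turns
--     seen = 0
--     start_idx = 0
--     for i in range(len(messages) - 1, -1, -1):
--         if messages[i].get("role") == "user":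
--             seen += 1
--             if seen > target_user_count:
--                 start_idx = i + 1
--                 break
--     return messages[start_idx:]
-- ===== SOURCE B (Python) =====
-- def _trim_conversation(messages, max_user_turns=20):
--     # Forward pass: positions of user messages; then one table lookup gives the cutoff.
--     idx = [i for i, m in enumerate(messages) if m.get("role") == "user"]
--     k = max(max_user_turns, 0)
--     n = len(idx)
--     if n <= k:
--         return messages
--     # position just after the oldest user message kept out of the window
--     return messages[idx[n - k - 1] + 1:]
-- ===== Notes on version B (the rewrite author's own statement) =====
-- stated objective: simpler
-- what changed: Replaces A's count-then-backward-scan-with-break by one forward pass building the table of user-message positions, from which the cutoff is a single indexed lookup (negative limits clamped to 0 by max, matching A's behaviour).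
import Mathlib
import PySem

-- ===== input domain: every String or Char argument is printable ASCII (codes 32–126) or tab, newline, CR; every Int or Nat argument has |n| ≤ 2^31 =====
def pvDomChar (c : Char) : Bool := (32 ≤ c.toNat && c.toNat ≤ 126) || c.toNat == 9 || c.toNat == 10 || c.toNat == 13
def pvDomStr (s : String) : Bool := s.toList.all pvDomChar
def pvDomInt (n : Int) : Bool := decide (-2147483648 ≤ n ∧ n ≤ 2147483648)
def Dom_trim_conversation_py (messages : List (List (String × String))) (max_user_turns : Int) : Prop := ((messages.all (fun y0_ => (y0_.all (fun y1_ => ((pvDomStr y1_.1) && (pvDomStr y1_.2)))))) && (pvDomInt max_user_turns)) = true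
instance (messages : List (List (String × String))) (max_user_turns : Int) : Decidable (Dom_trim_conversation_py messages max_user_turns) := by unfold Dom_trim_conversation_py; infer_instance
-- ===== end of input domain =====

-- B replaces A's count-then-backward-scan-with-break by a forward index table of user
-- positions plus one table lookup for the cutoff (objective: simpler/alternative).

-- ===== PORT A =====
-- m.get("role") == "user"
def pvIsUser (m : List (String × String)) : Bool := (PySem.Dict.mk m).get? "role" == some "user"

-- the backward `for i in range(len(messages)-1, -1, -1)` with its break; i counts down, seen accumulates
def pvLoopA (messages : List (List (String × String))) (target : Int) : Nat → Int → Int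
  | 0, seen =>
      if pvIsUser (messages.getD 0 []) && decide (seen + 1 > target) then 1 else 0
  | (j+1), seen =>
      if pvIsUser (messages.getD (j+1) []) then
        if seen + 1 > target then (j : Int) + 2
        else pvLoopA messages target j (seen + 1)
      else pvLoopA messages target j seen

def trim_conversation_py (messages : List (List (String × String))) (max_user_turns : Int) : List (List (String × String)) :=
  let user_msgs := messages.filter pvIsUser
  if (user_msgs.length : Int) ≤ max_user_turns then messages
  else
    let start_idx : Int :=
      if messages.length = 0 then 0             -- range(-1,-1,-1) is empty; start_idx stays 0
      else pvLoopA messages max_user_turns (messages.length - 1) 0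
    messages.drop start_idx.toNat               -- messages[start_idx:], start_idx ≥ 0

-- ===== PORT B =====
-- [i for i, m in enumerate(messages) if m.get("role") == "user"]
def pvUserIdx (messages : List (List (String × String))) (i : Nat) : List Nat :=
  match messages with
  | [] => []
  | m :: rest => if pvIsUser m then i :: pvUserIdx rest (i+1) else pvUserIdx rest (i+1)

def trim_conversation_py_alt (messages : List (List (String × String))) (max_user_turns : Int) : List (List (String × String)) :=
  let idx := pvUserIdx messages 0
  let k := max_user_turns.toNat                 -- max(max_user_turns, 0)
  let n := idx.length
  if n ≤ k then messages
  else messages.drop (idx.getD (n - k - 1) 0 + 1)   -- messages[idx[n-k-1]+1:]; index in range, slice start ≥ 0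

-- ===== PRECONDITION & SPEC =====
def Spec_trim_conversation_py (messages : List (List (String × String))) (max_user_turns : Int) (out : List (List (String × String))) : Prop := out = trim_conversation_py_alt messages max_user_turns
instance (messages : List (List (String × String))) (max_user_turns : Int) (out : List (List (String × String))) : Decidable (Spec_trim_conversation_py messages max_user_turns out) := by unfold Spec_trim_conversation_py; infer_instance

-- ===== CLAIM (what is proved, stated in full; the proofs are below) =====
def Claim_equal_trim_conversation_py : Prop := ∀ (messages : List (List (String × String))) (max_user_turns : Int), Dom_trim_conversation_py messages max_user_turns → Spec_trim_conversation_py messages max_user_turns (trim_conversation_py messages max_user_turns)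

-- ===== LEMMAS AND PROOFS =====

lemma pvUserIdx_append (xs : List (List (String × String))) (x : List (String × String)) (s : Nat) :
    pvUserIdx (xs ++ [x]) s =
      pvUserIdx xs s ++ (if pvIsUser x then [s + xs.length] else []) := by
  induction xs generalizing s with
  | nil => simp [pvUserIdx]
  | cons m rest ih =>
      simp only [List.cons_append, pvUserIdx, ih]
      split_ifs <;> simp <;> omega

lemma pvUserIdx_length (xs : List (List (String × String))) (s : Nat) :
    (pvUserIdx xs s).length = (xs.filter pvIsUser).length := by
  induction xs generalizing s with
  | nil => rfl
  | cons m rest ih =>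
      simp only [pvUserIdx, List.filter_cons]
      split_ifs <;> simp [ih]

-- invariant of A's backward loop: with u the user positions among the first i+1 messages
-- and t = target - seen, the loop returns u[len u - t⁺ - 1] + 1 when len u > t⁺, else 0.
lemma pvLoopA_eq (messages : List (List (String × String))) (target : Int) :
    ∀ (i : Nat) (seen : Int), i < messages.length →
      pvLoopA messages target i seen =
        (let u := pvUserIdx (messages.take (i+1)) 0
         if (target - seen).toNat < u.length
         then ((u.getD (u.length - (target - seen).toNat - 1) 0 : Nat) : Int) + 1
         else 0) := by
  intro i
  induction i with
  | zero =>
      intro seen hi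
      match messages, hi with
      | m :: rest, _ =>
        by_cases hu : pvIsUser m
        · by_cases hb : seen + 1 > target
          · have h0 : (target - seen).toNat = 0 := by omega
            simp [pvLoopA, pvUserIdx, hu, hb, h0, List.getD]
          · have h1 : ¬ (target - seen).toNat < 1 := by omega
            have hd : decide (seen + 1 > target) = false := decide_eq_false hb
            simp only [pvLoopA, List.getD_cons_zero, hd, Bool.and_false, Bool.false_eq_true,
              if_false, List.take_succ_cons, List.take_zero, pvUserIdx, hu, if_true]
            rw [if_neg (by simpa using h1)]
        · have hfalse : pvIsUser m = false := by simpa using hu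
          simp only [pvLoopA, List.getD_cons_zero, hfalse, Bool.false_and, Bool.false_eq_true,
            if_false, List.take_succ_cons, List.take_zero, pvUserIdx, List.length_nil]
          rw [if_neg (by omega)]
  | succ j ih =>
      intro seen hi
      have hj : j < messages.length := by omega
      have htake : messages.take (j+2) = messages.take (j+1) ++ [messages.getD (j+1) []] := by
        have h := List.take_add_one (l := messages) (i := j+1)
        have h2 : messages[j+1]?.toList = [messages.getD (j+1) []] := by
          have hg : messages.getD (j+1) [] = messages[j+1] := List.getD_eq_getElem _ _ hi
          rw [hg, List.getElem?_eq_getElem hi]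
          rfl
        rw [h, h2]
      have hlen : (messages.take (j+1)).length = j+1 := by
        simp [List.length_take]; omega
      set u := pvUserIdx (messages.take (j+1)) 0 with hu
      have happ : pvUserIdx (messages.take (j+2)) 0 =
          u ++ (if pvIsUser (messages.getD (j+1) []) then [j+1] else []) := by
        rw [htake, pvUserIdx_append, hlen, ← hu]; norm_num
      simp only [pvLoopA]
      by_cases huser : pvIsUser (messages.getD (j+1) [])
      · simp only [huser, if_true] at happ ⊢
        by_cases hb : seen + 1 > target
        · have h0 : (target - seen).toNat = 0 := by
            omega
          have hget : (u ++ [j+1]).getD u.length 0 = j + 1 := by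
            simp [List.getD]
          simp only [hb, if_true, happ, h0, List.length_append, List.length_cons,
            List.length_nil]
          rw [if_pos (by omega)]
          have hidx : u.length + (0 + 1) - 0 - 1 = u.length := by omega
          rw [hidx, hget]
          push_cast; ring
        · have h1 : 1 ≤ (target - seen).toNat := by omega
          have hts : (target - (seen+1)).toNat = (target - seen).toNat - 1 := by omega
          rw [ih (seen+1) hj]
          simp only [happ, hts, List.length_append, List.length_cons, List.length_nil, hb,
            if_false]
          by_cases hc : (target - seen).toNat - 1 < u.length
          · have hc2 : (target - seen).toNat < u.length + (0 + 1) := by omega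
            have hidx : u.length - ((target - seen).toNat - 1) - 1 =
                u.length + (0 + 1) - (target - seen).toNat - 1 := by omega
            have hidxlt : u.length + (0 + 1) - (target - seen).toNat - 1 < u.length := by omega
            have hget : (u ++ [j+1]).getD (u.length + (0 + 1) - (target - seen).toNat - 1) 0 =
                u.getD (u.length + (0 + 1) - (target - seen).toNat - 1) 0 := by
              rw [List.getD_append _ _ _ _ hidxlt]
            rw [if_pos hc, if_pos hc2, hidx, hget]
          · have hc2 : ¬ (target - seen).toNat < u.length + (0 + 1) := by omega
            rw [if_neg hc, if_neg hc2]
      · simp only [huser] at happ ⊢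
        rw [ih seen hj]
        simp [happ]

-- ===== VERDICT (by name: the statement is the Claim_ definition above) =====
theorem trim_conversation_py_spec : Claim_equal_trim_conversation_py := by
  intro messages max_user_turns _
  unfold Spec_trim_conversation_py trim_conversation_py trim_conversation_py_alt
  have hcount : (pvUserIdx messages 0).length = (messages.filter pvIsUser).length :=
    pvUserIdx_length messages 0
  by_cases hA : ((messages.filter pvIsUser).length : Int) ≤ max_user_turns
  · rw [if_pos hA, if_pos (by omega)]
  · rw [if_neg hA]
    by_cases h0 : messages.length = 0
    · have hnil : messages = [] := List.length_eq_zero_iff.mp h0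
      subst hnil
      simp [pvUserIdx]
    · rw [if_neg h0]
      rw [pvLoopA_eq messages max_user_turns (messages.length - 1) 0 (by omega)]
      have htake : messages.take (messages.length - 1 + 1) = messages := by
        rw [List.take_of_length_le]; omega
      rw [htake]
      simp only [Int.sub_zero, hcount]
      by_cases hn0 : (messages.filter pvIsUser).length = 0
      · -- no user messages but max_user_turns < 0: loop finds nothing, both return messages
        rw [if_neg (by omega), if_pos (by omega)]
        simp
      · have hlt : max_user_turns.toNat < (messages.filter pvIsUser).length := by omega
        rw [if_pos hlt, if_neg (by omega)]
        congr 1
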